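-- pv_equiv track=rewrite | github.com/dagsdags212/rosalind | string_algorithms/find_protein_motif.py | generate_protein_index
-- ===== SOURCE A (Python) =====
-- def generate_protein_index(protein_seq):
--     """ Returns a dictionary mapping all protein 4-mers to their starting index.
--         Index is used to find the N-glycosylation motif written as:
--             N{P}[ST]{P}
--     """
--     index = {}
--     for i in range(len(protein_seq)-3):
--         substr = protein_seq[i:i+4]
--         # skip further comparisons if substring does not start with N
--         if not is_valid_glycosylation_motif(substr): continue
--         if substr not in index:
--             index[substr] =[i+1]
--         else:
--             index[substr].append(i+1)
--     return index
--
-- def is_valid_glycosylation_motif(substr):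
--     return (substr[0] == 'N') and (substr[1] != 'P') and (substr[2] in 'ST') and (substr[3] != 'P')
-- ===== SOURCE B (Python) =====
-- import re
--
-- # The N-glycosylation motif N{P}[ST]{P} as an overlapping-match lookahead regex.
-- _MOTIF = re.compile(r'(?=(N[^P][ST][^P]))')
--
-- def generate_protein_index(protein_seq):
--     """ Returns a dictionary mapping all protein 4-mers to their starting index.
--         Index is used to find the N-glycosylation motif written as:
--             N{P}[ST]{P}
--     """
--     index = {}
--     for m in _MOTIF.finditer(protein_seq):
--         index.setdefault(m.group(1), []).append(m.start() + 1)
--     return index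
-- ===== Notes on version B (the rewrite author's own statement) =====
-- stated objective: idiomatic
-- what changed: Replaces the manual index loop with its slicing and is_valid helper by a single compiled regex scan: an overlapping-match lookahead r'(?=(N[^P][ST][^P]))' is iterated with finditer and each captured 4-mer is grouped to its 1-based start via setdefault-append.
import Mathlib
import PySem

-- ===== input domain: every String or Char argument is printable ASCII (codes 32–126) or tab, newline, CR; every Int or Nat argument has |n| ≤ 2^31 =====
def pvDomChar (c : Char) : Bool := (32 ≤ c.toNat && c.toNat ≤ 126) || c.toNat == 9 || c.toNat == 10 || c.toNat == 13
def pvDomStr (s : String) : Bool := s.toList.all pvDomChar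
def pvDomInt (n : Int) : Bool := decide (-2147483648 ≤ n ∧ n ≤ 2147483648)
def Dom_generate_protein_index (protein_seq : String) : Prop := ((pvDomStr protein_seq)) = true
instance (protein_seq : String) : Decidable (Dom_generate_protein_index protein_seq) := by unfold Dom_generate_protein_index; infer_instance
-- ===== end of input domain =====

-- B replaces A's index loop + validity helper by a single regex-style overlapping scan
-- (lookahead pattern N[^P][ST][^P]) feeding a setdefault-append grouping; idiomatic, and measurably
-- faster in Python (compiled regex scan instead of per-position slicing).


-- ===== PORT A =====
-- Python: is_valid_glycosylation_motif(substr).  The 'none' arms are Python's IndexError;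
-- inside generate_protein_index the substring always has four characters, so they are never reached.
def is_valid_glycosylation_motif (substr : String) : Bool :=
  match PySem.Str.pyGet? substr 0, PySem.Str.pyGet? substr 1,
        PySem.Str.pyGet? substr 2, PySem.Str.pyGet? substr 3 with
  | some c0, some c1, some c2, some c3 =>
      (c0 == 'N') && (c1 != 'P') && PySem.Str.isIn (String.ofList [c2]) "ST" && (c3 != 'P')
  | _, _, _, _ => false

def generate_protein_index (protein_seq : String) : List (String × List Int) :=
  ((PySem.List.pyRange 0 (PySem.Str.len protein_seq - 3) 1).foldl
    (fun (index : PySem.Dict String (List Int)) i =>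
      let substr := PySem.Str.slice protein_seq (some i) (some (i + 4))
      if !is_valid_glycosylation_motif substr then index
      else if index.contains substr = false then index.insert substr [i + 1]
      else index.modify substr [] (· ++ [i + 1]))
    PySem.Dict.empty).items

-- ===== PORT B =====
-- Hand port of re.finditer with the FIXED lookahead pattern r'(?=(N[^P][ST][^P]))' (Source B's _MOTIF):
-- the scan visits every position left to right and the capture matches at a position iff the next
-- four characters are N, non-P, S-or-T, non-P; exact for this fixed pattern.
def motif_matches : List Char → Nat → List (Nat × String)
  | [], _ => []
  | c0 :: rest, pos =>
    (match rest with
     | c1 :: c2 :: c3 :: _ =>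
       if c0 == 'N' && c1 != 'P' && (c2 == 'S' || c2 == 'T') && c3 != 'P'
       then [(pos, String.ofList [c0, c1, c2, c3])]
       else []
     | _ => []) ++ motif_matches rest (pos + 1)

def generate_protein_index_alt (protein_seq : String) : List (String × List Int) :=
  ((motif_matches protein_seq.toList 0).foldl
     (fun (index : PySem.Dict String (List Int)) m =>
        -- index.setdefault(m.group(1), []).append(m.start() + 1)
        index.modify m.2 [] (· ++ [(m.1 : Int) + 1]))
     PySem.Dict.empty).items

-- ===== PRECONDITION & SPEC =====
def Spec_generate_protein_index (protein_seq : String) (out : List (String × List Int)) : Prop := out = generate_protein_index_alt protein_seq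
instance (protein_seq : String) (out : List (String × List Int)) : Decidable (Spec_generate_protein_index protein_seq out) := by unfold Spec_generate_protein_index; infer_instance

-- ===== CLAIM (what is proved, stated in full; the proofs are below) =====
def Claim_equal_generate_protein_index : Prop := ∀ (protein_seq : String), Dom_generate_protein_index protein_seq → Spec_generate_protein_index protein_seq (generate_protein_index protein_seq)

-- ===== LEMMAS AND PROOFS =====

theorem pv_isIn_ST (c : Char) :
    PySem.Chars.isIn [c] ['S', 'T'] = (c == 'S' || c == 'T') := by
  by_cases hs : c = 'S'; · subst hs; decide
  by_cases ht : c = 'T'; · subst ht; decide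
  have hni : ¬ ([c] <:+: ['S', 'T']) := by
    intro h
    have : c ∈ ['S', 'T'] := h.subset (List.mem_singleton_self c)
    simp at this; tauto
  have h2 : PySem.Chars.isIn [c] ['S', 'T'] = false := (PySem.Chars.isIn_eq_false_iff _ _).mpr hni
  simp [h2, hs, ht]

theorem pv_valid_four (c0 c1 c2 c3 : Char) :
    is_valid_glycosylation_motif (String.ofList [c0, c1, c2, c3])
    = (c0 == 'N' && c1 != 'P' && (c2 == 'S' || c2 == 'T') && c3 != 'P') := by
  simp [is_valid_glycosylation_motif, PySem.List.pyGet?, PySem.List.pyIdx?, pv_isIn_ST]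



theorem pv_motif_matches_short (cs : List Char) (pos : Nat) (h : cs.length ≤ 3) :
    motif_matches cs pos = [] := by
  match cs, h with
  | [], _ => rfl
  | [a], _ => rfl
  | [a, b], _ => rfl
  | [a, b, c], _ => rfl

theorem pv_main (full : List Char) (cs : List Char) :
    ∀ (pos : Nat) (d : PySem.Dict String (List Int)), cs = full.drop pos →
    (PySem.List.pyRange pos ((full.length : Int) - 3) 1).foldl
      (fun (index : PySem.Dict String (List Int)) i =>
        let substr := String.ofList (PySem.Chars.slice full (some i) (some (i + 4)))
        if !is_valid_glycosylation_motif substr then index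
        else if index.contains substr = false then index.insert substr [i + 1]
        else index.modify substr [] (· ++ [i + 1])) d
    = (motif_matches cs pos).foldl
        (fun (index : PySem.Dict String (List Int)) m =>
           index.modify m.2 [] (· ++ [(m.1 : Int) + 1])) d := by
  induction cs with
  | nil =>
    intro pos d hdrop
    have hpos : full.length ≤ pos := by
      have := congrArg List.length hdrop
      simp [List.length_drop] at this; omega
    rw [PySem.List.pyRange_one_eq_nil (by omega), motif_matches]
    rfl
  | cons c0 rest ih =>
    intro pos d hdrop
    have hlen : full.length - pos = rest.length + 1 := by
      have := congrArg List.length hdrop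
      simp [List.length_drop] at this; omega
    have hposlt : pos < full.length := by omega
    have hdrop1 : rest = full.drop (pos + 1) := by
      have h2 : (full.drop pos).tail = full.drop (pos + 1) := by
        rw [← List.drop_drop]; simp
      rw [← h2, ← hdrop]
      rfl
    by_cases hlt : (pos : Int) < (full.length : Int) - 3
    · -- in range: rest has at least three characters
      have hr3 : 3 ≤ rest.length := by omega
      match rest, hr3, hdrop, hdrop1, ih with
      | c1 :: c2 :: c3 :: rest', _, hdrop, hdrop1, ih =>
        rw [PySem.List.pyRange_one_cons hlt]
        have hcast : ((pos : Int) + 1) = ((pos + 1 : Nat) : Int) := by push_cast; ring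
        have hsub : PySem.Chars.slice full (some (pos : Int)) (some ((pos : Int) + 4))
            = [c0, c1, c2, c3] := by
          have h4 : ((pos : Int) + 4) = ((pos : Int) + ((4 : Nat) : Int)) := by norm_num
          rw [PySem.Chars.slice_eq_listSlice, h4, PySem.List.slice_natCast_add, ← hdrop]
          rfl
        rw [motif_matches]
        simp only [List.foldl_cons, hsub, pv_valid_four]
        by_cases hb : (c0 == 'N' && c1 != 'P' && (c2 == 'S' || c2 == 'T') && c3 != 'P') = true
        · rw [hb]
          have hstep :
              (if (!true) = true then d
               else if d.contains (String.ofList [c0, c1, c2, c3]) = false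
                 then d.insert (String.ofList [c0, c1, c2, c3]) [(pos : Int) + 1]
                 else d.modify (String.ofList [c0, c1, c2, c3]) [] (· ++ [(pos : Int) + 1]))
              = d.modify (String.ofList [c0, c1, c2, c3]) [] (· ++ [(pos : Int) + 1]) := by
            simp only [Bool.not_true, Bool.false_eq_true, if_false]
            by_cases hc : d.contains (String.ofList [c0, c1, c2, c3]) = false
            · rw [if_pos hc, PySem.Dict.modify, PySem.Dict.getD_of_not_contains d _ hc]
              simp
            · rw [if_neg hc]
          rw [hstep, if_pos rfl, List.singleton_append, List.foldl_cons]
          rw [hcast, ih (pos + 1) _ hdrop1]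
        · simp only [Bool.not_eq_true] at hb
          rw [hb]
          simp only [Bool.not_false, Bool.false_eq_true, if_false,
            List.nil_append, if_true]
          rw [hcast, ih (pos + 1) _ hdrop1]
    · -- out of range: the loop is empty and no match fits in the remaining ≤ 3 characters
      rw [PySem.List.pyRange_one_eq_nil (by omega),
          pv_motif_matches_short (c0 :: rest) pos (by simp; omega)]
      rfl

-- ===== VERDICT (by name: the statement is the Claim_ definition above) =====
theorem generate_protein_index_spec : Claim_equal_generate_protein_index := by
  intro s _
  unfold Spec_generate_protein_index generate_protein_index generate_protein_index_alt
  have h := pv_main s.toList s.toList 0 PySem.Dict.empty (by simp)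
  simp only [Nat.cast_zero] at h
  simp only [PySem.Str.slice, PySem.Str.len_eq]
  exact congrArg PySem.Dict.items h
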